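-- pv_equiv track=rewrite | github.com/cor1211/ISSM-SAR | pipeline_support/sr_packaging_support.py | _normalize_public_token
-- ===== SOURCE A (Python) =====
-- from typing import Any, Dict, List, Optional, Tuple
--
-- def _normalize_public_token(value: Any) -> str:
--     raw = str(value or "").strip()
--     if not raw:
--         return ""
--     chars: List[str] = []
--     last_was_sep = False
--     for ch in raw:
--         if ch.isalnum() or ch in {"-", "_"}:
--             chars.append(ch)
--             last_was_sep = False
--         else:
--             if not last_was_sep:
--                 chars.append("_")
--             last_was_sep = True
--     return "".join(chars).strip("_")
-- ===== SOURCE B (Python) =====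
-- from itertools import groupby
--
--
-- def _normalize_public_token(value):
--     raw = str(value or "").strip()
--     if not raw:
--         return ""
--     parts = []
--     for allowed, grp in groupby(raw, key=lambda ch: ch.isalnum() or ch in {"-", "_"}):
--         parts.append("".join(grp) if allowed else "_")
--     return "".join(parts).strip("_")
-- ===== Notes on version B (the rewrite author's own statement) =====
-- stated objective: alternative
-- what changed: Replaces the char-by-char loop with its last_was_sep flag by itertools.groupby run grouping: each allowed run is emitted verbatim and each disallowed run collapses to a single underscore.
import Mathlib
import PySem

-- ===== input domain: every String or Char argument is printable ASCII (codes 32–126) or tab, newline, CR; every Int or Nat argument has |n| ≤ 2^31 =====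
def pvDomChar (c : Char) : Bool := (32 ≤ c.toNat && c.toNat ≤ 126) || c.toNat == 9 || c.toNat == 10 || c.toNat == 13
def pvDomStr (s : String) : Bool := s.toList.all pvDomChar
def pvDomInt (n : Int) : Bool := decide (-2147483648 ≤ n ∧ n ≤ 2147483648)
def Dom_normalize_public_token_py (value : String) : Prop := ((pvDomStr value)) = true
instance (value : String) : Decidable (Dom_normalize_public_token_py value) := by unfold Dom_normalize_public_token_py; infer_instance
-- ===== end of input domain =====

-- B replaces A's char-by-char last_was_sep flag by itertools.groupby run grouping (alternative decomposition, same cost).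

-- ===== PORT A =====
-- literal port of A's loop: state (chars, last_was_sep)
def normalize_public_token_py (value : String) : String :=
  let raw := PySem.Chars.strip value.toList      -- str(value or "").strip(): str of a string is itself
  if raw = [] then "" else
    let r := raw.foldl (fun (st : List Char × Bool) ch =>
      if PySem.Chars.isalnum ch || ch == '-' || ch == '_' then (st.1 ++ [ch], false)
      else if !st.2 then (st.1 ++ ['_'], true) else (st.1, true)) ([], false)
    String.ofList (PySem.Chars.stripChars r.1 ['_'])

-- ===== PORT B =====
-- the groupby key
def pvAllowed (ch : Char) : Bool := PySem.Chars.isalnum ch || ch == '-' || ch == '_'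

-- the groupby loop of Source B: each maximal run of same key becomes one part
def pvParts : List Char → List (List Char)
  | [] => []
  | c :: cs =>
    if pvAllowed c then
      ((c :: cs).takeWhile pvAllowed) :: pvParts ((c :: cs).dropWhile pvAllowed)
    else
      ['_'] :: pvParts ((c :: cs).dropWhile (fun x => !pvAllowed x))
termination_by l => l.length
decreasing_by
  · simp only [List.dropWhile_cons, *, if_pos]
    have := List.length_dropWhile_le pvAllowed cs
    simp; omega
  · simp only [List.dropWhile_cons]
    have h : (!pvAllowed c) = true := by simp [*]
    rw [if_pos h]
    have := List.length_dropWhile_le (fun x => !pvAllowed x) cs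
    simp; omega

def normalize_public_token_py_alt (value : String) : String :=
  let raw := PySem.Chars.strip value.toList
  if raw = [] then "" else
    String.ofList (PySem.Chars.stripChars (pvParts raw).flatten ['_'])

-- ===== PRECONDITION & SPEC =====
def Spec_normalize_public_token_py (value : String) (out : String) : Prop := out = normalize_public_token_py_alt value
instance (value : String) (out : String) : Decidable (Spec_normalize_public_token_py value out) := by unfold Spec_normalize_public_token_py; infer_instance

-- ===== CLAIM (what is proved, stated in full; the proofs are below) =====
def Claim_equal_normalize_public_token_py : Prop := ∀ (value : String), Dom_normalize_public_token_py value → Spec_normalize_public_token_py value (normalize_public_token_py value)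

-- ===== LEMMAS AND PROOFS =====


lemma pvParts_flatten_cons_sep (c : Char) (cs : List Char) (h : pvAllowed c = false) :
    (pvParts (c :: cs)).flatten = '_' :: (pvParts (cs.dropWhile (fun x => !pvAllowed x))).flatten := by
  rw [pvParts, if_neg (by simp [h])]
  simp [h]

-- unfolding pvParts on an allowed head peels exactly that character
lemma pvParts_flatten_cons_allowed (c : Char) (cs : List Char) (h : pvAllowed c = true) :
    (pvParts (c :: cs)).flatten = c :: (pvParts cs).flatten := by
  rw [pvParts, if_pos h]
  cases cs with
  | nil => simp [pvParts, List.takeWhile, List.dropWhile, h]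
  | cons d ds =>
    by_cases hd : pvAllowed d
    · rw [pvParts, if_pos hd]
      simp [h, hd]
    · simp only [List.takeWhile_cons, List.dropWhile_cons, h, if_pos, hd, Bool.false_eq_true,
        if_false]
      simp [pvParts_flatten_cons_sep d ds (by simp [hd])]

-- A's fold state vs B's parts: the main invariant, both flag values at once
lemma pvLoop_eq_parts (cs : List Char) : ∀ (acc : List Char),
    (cs.foldl (fun (st : List Char × Bool) ch =>
      if PySem.Chars.isalnum ch || ch == '-' || ch == '_' then (st.1 ++ [ch], false)
      else if !st.2 then (st.1 ++ ['_'], true) else (st.1, true)) (acc, false)).1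
      = acc ++ (pvParts cs).flatten
    ∧
    (cs.foldl (fun (st : List Char × Bool) ch =>
      if PySem.Chars.isalnum ch || ch == '-' || ch == '_' then (st.1 ++ [ch], false)
      else if !st.2 then (st.1 ++ ['_'], true) else (st.1, true)) (acc, true)).1
      = acc ++ (pvParts (cs.dropWhile (fun x => !pvAllowed x))).flatten := by
  induction cs with
  | nil => intro acc; simp [pvParts]
  | cons c cs ih =>
    intro acc
    by_cases h : pvAllowed c
    · have hc : (PySem.Chars.isalnum c || c == '-' || c == '_') = true := h
      constructor
      · simp only [List.foldl_cons, hc, if_pos]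
        rw [(ih (acc ++ [c])).1, pvParts_flatten_cons_allowed c cs h]
        simp
      · simp only [List.foldl_cons, hc, if_pos]
        rw [(ih (acc ++ [c])).1, List.dropWhile_cons, if_neg (by simp [h]),
          pvParts_flatten_cons_allowed c cs h]
        simp
    · have hc : (PySem.Chars.isalnum c || c == '-' || c == '_') = false := by
        simpa [pvAllowed] using h
      constructor
      · simp only [List.foldl_cons, hc, Bool.false_eq_true, if_false, Bool.not_false, if_true]
        rw [(ih (acc ++ ['_'])).2, pvParts_flatten_cons_sep c cs (by simpa using h)]
        simp
      · simp only [List.foldl_cons, hc, Bool.false_eq_true, if_false, Bool.not_true]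
        rw [(ih acc).2, List.dropWhile_cons, if_pos (by simp [h])]

-- ===== VERDICT (by name: the statement is the Claim_ definition above) =====
theorem normalize_public_token_py_spec : Claim_equal_normalize_public_token_py := by
  intro value _
  unfold Spec_normalize_public_token_py normalize_public_token_py normalize_public_token_py_alt
  by_cases h : PySem.Chars.strip value.toList = []
  · simp [h]
  · simp only [h, if_false]
    rw [(pvLoop_eq_parts (PySem.Chars.strip value.toList) []).1]
    simp
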